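-- pv_equiv track=rewrite | github.com/ra1nb0rn/search_vulns | src/search_vulns/modules/linux_distro_backpatches/redhat/build.py | get_version_init_dot_count
-- ===== SOURCE A (Python) =====
-- def get_version_init_dot_count(fixed_version):
--     dot_count = 0
--     for char in fixed_version:
--         if char == ".":
--             dot_count += 1
--         elif not char.isalnum():
--             break
--     return dot_count
-- ===== SOURCE B (Python) =====
-- def get_version_init_dot_count(fixed_version):
--     # Jump from dot to dot with str.find; a dot counts iff the segment since the
--     # previous dot is empty or entirely alphanumeric; the first segment that is
--     # neither ends the count (A would have hit its break before this dot).
--     count = 0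
--     pos = 0
--     while True:
--         j = fixed_version.find(".", pos)
--         if j == -1:
--             return count
--         seg = fixed_version[pos:j]
--         if seg and not seg.isalnum():
--             return count
--         count += 1
--         pos = j + 1
-- ===== Notes on version B (the rewrite author's own statement) =====
-- stated objective: faster
-- what changed: Replaces A's char-by-char accumulating scan by a dot-jumping loop: repeatedly str.find the next '.', validate the whole inter-dot segment with one str.isalnum call, and stop at the first invalid segment; find/isalnum run at C speed so the Python-level loop executes once per dot instead of once per character.
import Mathlib
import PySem

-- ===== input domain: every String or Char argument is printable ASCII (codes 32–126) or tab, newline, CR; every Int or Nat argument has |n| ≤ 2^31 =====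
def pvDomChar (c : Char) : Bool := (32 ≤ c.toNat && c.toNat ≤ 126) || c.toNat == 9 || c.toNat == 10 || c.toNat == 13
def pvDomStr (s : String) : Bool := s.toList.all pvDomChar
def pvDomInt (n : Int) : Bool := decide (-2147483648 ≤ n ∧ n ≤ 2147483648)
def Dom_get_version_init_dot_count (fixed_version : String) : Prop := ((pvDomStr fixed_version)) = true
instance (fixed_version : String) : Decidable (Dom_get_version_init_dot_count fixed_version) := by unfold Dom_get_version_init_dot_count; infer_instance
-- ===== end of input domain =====

-- B replaces A's char-by-char accumulating scan by a dot-jumping loop (find the next dot, validate the inter-dot segment in one isalnum call); intended to be faster via C-speed find/isalnum, one Python-level iteration per dot.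

-- ===== PORT A =====
-- A's for-loop with break, as structural recursion with the dot_count accumulator.
def pvLoopA : List Char → Int → Int
  | [], dot_count => dot_count
  | c :: rest, dot_count =>
      if c = '.' then pvLoopA rest (dot_count + 1)
      else if ¬ (PySem.Chars.isalnum c = true) then dot_count
      else pvLoopA rest dot_count

def get_version_init_dot_count (fixed_version : String) : Int :=
  pvLoopA fixed_version.toList 0

-- ===== PORT B =====
-- B's while-loop: the state (pos, count) becomes (suffix from pos, count);
-- `fixed_version.find('.', pos)` / the slice `fixed_version[pos:j]` become
-- dropWhile / takeWhile at the first '.' of that suffix; `seg.isalnum()` is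
-- `seg ≠ [] && seg.all isalnum` (Python's str.isalnum is false on '').
def pvLoopB (l : List Char) (count : Int) : Int :=
  if hr : l.dropWhile (fun c => ¬ c = '.') = [] then count   -- j == -1
  else
    if l.takeWhile (fun c => ¬ c = '.') ≠ [] ∧
       ¬ ((l.takeWhile (fun c => ¬ c = '.')).all PySem.Chars.isalnum = true) then count
    else pvLoopB (l.dropWhile (fun c => ¬ c = '.')).tail (count + 1)
termination_by l.length
decreasing_by
  simp only [decide_not, List.length_tail] at *
  have hle := List.length_dropWhile_le (fun c : Char => !decide (c = '.')) l
  have hpos := List.length_pos_of_ne_nil hr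
  omega

def get_version_init_dot_count_alt (fixed_version : String) : Int :=
  pvLoopB fixed_version.toList 0

-- ===== PRECONDITION & SPEC =====
def Spec_get_version_init_dot_count (fixed_version : String) (out : Int) : Prop := out = get_version_init_dot_count_alt fixed_version
instance (fixed_version : String) (out : Int) : Decidable (Spec_get_version_init_dot_count fixed_version out) := by unfold Spec_get_version_init_dot_count; infer_instance

-- ===== CLAIM (what is proved, stated in full; the proofs are below) =====
def Claim_equal_get_version_init_dot_count : Prop := ∀ (fixed_version : String), Dom_get_version_init_dot_count fixed_version → Spec_get_version_init_dot_count fixed_version (get_version_init_dot_count fixed_version)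

-- ===== LEMMAS AND PROOFS =====

-- On a dot-free list A never increments: it either scans to the end or breaks; both give acc.
theorem pvLoopA_noDot (l : List Char) (acc : Int) (h : ∀ c ∈ l, ¬ c = '.') :
    pvLoopA l acc = acc := by
  induction l with
  | nil => rfl
  | cons c rest ih =>
    have hc := h c (by simp)
    by_cases ha : PySem.Chars.isalnum c = true
    · simp [pvLoopA, hc, ha]; exact ih (fun d hd => h d (by simp [hd]))
    · simp [pvLoopA, hc, ha]

-- A dot-free segment containing a non-alnum char makes A break with acc, whatever follows.
theorem pvLoopA_break (seg rest : List Char) (acc : Int)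
    (hd : ∀ c ∈ seg, ¬ c = '.') (hn : ¬ (seg.all PySem.Chars.isalnum = true)) :
    pvLoopA (seg ++ rest) acc = acc := by
  induction seg with
  | nil => simp [List.all_nil] at hn
  | cons c s ih =>
    have hc := hd c (by simp)
    by_cases ha : PySem.Chars.isalnum c = true
    · have hs : ¬ (s.all PySem.Chars.isalnum = true) := by
        simp [List.all_cons, ha] at hn; simp [hn]
      simp [pvLoopA, hc, ha]
      exact ih (fun d hdm => hd d (by simp [hdm])) hs
    · simp [pvLoopA, hc, ha]

-- A dot-free all-alnum segment is skipped; the dot after it increments.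
theorem pvLoopA_skip (seg tail : List Char) (acc : Int)
    (hd : ∀ c ∈ seg, ¬ c = '.') (ha : seg.all PySem.Chars.isalnum = true) :
    pvLoopA (seg ++ '.' :: tail) acc = pvLoopA tail (acc + 1) := by
  induction seg generalizing acc with
  | nil => simp [pvLoopA]
  | cons c s ih =>
    have hc := hd c (by simp)
    have hca : PySem.Chars.isalnum c = true := by rw [List.all_cons, Bool.and_eq_true] at ha; exact ha.1
    have ha' := ha
    rw [List.all_cons, Bool.and_eq_true] at ha'
    rw [List.cons_append,
      show pvLoopA (c :: (s ++ '.' :: tail)) acc = pvLoopA (s ++ '.' :: tail) acc from by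
        simp [pvLoopA, hc, hca]]
    exact ih acc (fun d hdm => hd d (List.mem_cons_of_mem _ hdm)) ha'.2

theorem loops_eq (l : List Char) (acc : Int) : pvLoopA l acc = pvLoopB l acc := by
  induction l, acc using pvLoopB.induct with
  | case1 l acc h =>
    -- no dot in l: l is its own dot-free takeWhile prefix
    rw [pvLoopB, dif_pos h]
    have hl : l.takeWhile (fun c => decide ¬ c = '.') = l := by
      have := List.takeWhile_append_dropWhile (p := fun c => decide ¬ c = '.') (l := l)
      rw [h, List.append_nil] at this; exact this
    exact pvLoopA_noDot l acc (fun c hc => by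
      have := List.mem_takeWhile_imp (l := l) (p := fun c => decide ¬ c = '.') (hl ▸ hc)
      simpa using this)
  | case2 l acc h hbad =>
    rw [pvLoopB, dif_neg h, if_pos hbad]
    obtain ⟨c, tail, hct⟩ := List.exists_cons_of_ne_nil h
    have hsplit : l.takeWhile (fun c => decide ¬ c = '.') ++ c :: tail = l := by
      have := List.takeWhile_append_dropWhile (p := fun c => decide ¬ c = '.') (l := l)
      rw [hct] at this; exact this
    conv_lhs => rw [← hsplit]
    exact pvLoopA_break _ (c :: tail) acc
      (fun d hdm => by
        have := List.mem_takeWhile_imp hdm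
        simpa using this) hbad.2
  | case3 l acc h hok ih =>
    rw [pvLoopB, dif_neg h, if_neg hok]
    obtain ⟨c, tail, hct⟩ := List.exists_cons_of_ne_nil h
    have hsplit : l.takeWhile (fun c => decide ¬ c = '.') ++ c :: tail = l := by
      have := List.takeWhile_append_dropWhile (p := fun c => decide ¬ c = '.') (l := l)
      rw [hct] at this; exact this
    have hcdot : c = '.' := by
      have hc := List.head?_dropWhile_not (p := fun c => decide ¬ c = '.') (l := l)
      rw [hct] at hc
      simpa using hc
    have hseg : ∀ d ∈ l.takeWhile (fun c => decide ¬ c = '.'), ¬ d = '.' := fun d hdm => by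
      have := List.mem_takeWhile_imp hdm
      simpa using this
    rw [hct] at ih ⊢
    simp only [List.tail_cons] at ih ⊢
    rw [Decidable.not_and_iff_not_or_not, not_not, not_not] at hok
    by_cases hnil : l.takeWhile (fun c => decide ¬ c = '.') = []
    · conv_lhs => rw [← hsplit, hcdot, hnil]
      simpa [pvLoopA] using ih
    · have hall : (l.takeWhile (fun c => decide ¬ c = '.')).all PySem.Chars.isalnum = true := by
        rcases hok with h1 | h2
        · exact absurd h1 (by simpa using hnil)
        · exact h2
      conv_lhs => rw [← hsplit, hcdot]
      rw [pvLoopA_skip _ tail acc hseg hall]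
      exact ih

-- ===== VERDICT (by name: the statement is the Claim_ definition above) =====
theorem get_version_init_dot_count_spec : Claim_equal_get_version_init_dot_count := by
  intro s _
  show _ = _
  simp [get_version_init_dot_count, get_version_init_dot_count_alt, loops_eq]
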